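-- pv_equiv track=rewrite | github.com/botisko/AdventOfCode | 2020/day_06_2020.py | process_list_data
-- ===== SOURCE A (Python) =====
-- def process_list_data(list_data):
--     """
--     Create a list of passports
--     :param list_data: input data
--     :return: processed data
--     """
--     nu_list = list()
--
--     tmp_str = ''
--     for idx, item in enumerate(list_data):
--         if item != '':
--             tmp_str += item
--         else:
--             nu_list.append(tmp_str)
--             tmp_str = ''
--
--         if idx == len(list_data) - 1:
--             nu_list.append(tmp_str)
--
--     return nu_list
-- ===== SOURCE B (Python) =====
-- def process_list_data(list_data):
--     """
--     Create a list of passports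
--     :param list_data: input data
--     :return: processed data
--     """
--     if not list_data:
--         return []
--     return _groups(list_data)
--
--
-- def _groups(items):
--     if '' in items:
--         i = items.index('')
--         return [''.join(items[:i])] + _groups(items[i + 1:])
--     return [''.join(items)]
-- ===== Notes on version B (the rewrite author's own statement) =====
-- stated objective: alternative
-- what changed: Replaced A's single per-element loop with enumerate, a string accumulator and a last-index flush by recursion on the delimiter structure: locate the first '' with index, ''.join the prefix slice, and recurse on the suffix after it (empty input short-circuits to []).
import Mathlib
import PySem

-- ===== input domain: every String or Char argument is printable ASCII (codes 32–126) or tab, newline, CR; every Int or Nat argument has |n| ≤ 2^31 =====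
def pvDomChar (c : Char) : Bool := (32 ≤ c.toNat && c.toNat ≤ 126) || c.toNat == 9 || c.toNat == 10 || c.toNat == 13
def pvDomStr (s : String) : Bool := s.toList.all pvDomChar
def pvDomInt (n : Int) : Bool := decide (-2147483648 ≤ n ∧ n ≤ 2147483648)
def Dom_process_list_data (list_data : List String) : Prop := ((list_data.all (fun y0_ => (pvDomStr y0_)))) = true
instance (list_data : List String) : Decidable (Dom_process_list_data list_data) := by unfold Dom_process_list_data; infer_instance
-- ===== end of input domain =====

-- B replaces A's per-element loop (enumerate + string accumulator + last-index flush) by recursion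
-- on the delimiter structure: find the first '', join the prefix, recurse on the suffix (objective: alternative).

-- ===== PORT A =====
-- forward loop over enumerate(list_data): string accumulator, flushed on '' and at the last index
def process_list_data (list_data : List String) : List String :=
  ((PySem.List.enumerate list_data).foldl
    (fun (st : List String × String) (p : Int × String) =>
      let st1 := if p.2 ≠ "" then (st.1, st.2 ++ p.2) else (st.1 ++ [st.2], "")
      if p.1 = (list_data.length : Int) - 1 then (st1.1 ++ [st1.2], st1.2) else st1)
    ([], "")).1

-- ===== PORT B =====
-- _groups: items.index('') under the guard '' in items → List.idxOf (exact: first occurrence);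
-- the slices items[:i] and items[i+1:] with 0 ≤ i < len(items) are exactly take i / drop (i+1)
def pvGroupsB (items : List String) : List String :=
  if h : "" ∈ items then
    [PySem.Str.join "" (items.take (items.idxOf ""))]
      ++ pvGroupsB (items.drop (items.idxOf "" + 1))
  else [PySem.Str.join "" items]
termination_by items.length
decreasing_by
  simp only [List.length_drop]
  have := List.idxOf_lt_length_of_mem h
  omega

def process_list_data_alt (list_data : List String) : List String :=
  if list_data = [] then [] else pvGroupsB list_data

-- ===== PRECONDITION & SPEC =====
def Spec_process_list_data (list_data : List String) (out : List String) : Prop := out = process_list_data_alt list_data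
instance (list_data : List String) (out : List String) : Decidable (Spec_process_list_data list_data out) := by unfold Spec_process_list_data; infer_instance

-- ===== CLAIM =====
def Claim_equal_process_list_data : Prop := ∀ (list_data : List String), Dom_process_list_data list_data → Spec_process_list_data list_data (process_list_data list_data)

-- ===== LEMMAS AND PROOFS =====

-- A's per-element step without the last-index test
def pvStepA (st : List String × String) (item : String) : List String × String :=
  if item ≠ "" then (st.1, st.2 ++ item) else (st.1 ++ [st.2], "")

def pvJn (g : List String) : String := PySem.Str.join "" g

lemma pv_intercalate_nil (xs : List (List Char)) : List.intercalate [] xs = xs.flatten := by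
  induction xs with
  | nil => rfl
  | cons a t ih =>
    cases t with
    | nil => simp [List.intercalate]
    | cons b r =>
      simp [List.intercalate] at ih ⊢
      simpa using ih

lemma pv_jn_cons (s : String) (g : List String) : pvJn (s :: g) = s ++ pvJn g := by
  simp [pvJn, PySem.Str.join, PySem.Chars.join, pv_intercalate_nil,
    String.ofList_append, String.ofList_toList]

-- A's simple fold, with the index machinery of the enumerate loop discharged (the last-index
-- test fires exactly on the final element)
lemma pv_enum_foldl (xs : List String) (nu : List String) (tmp : String) (s n : Int)
    (hs : s + xs.length = n) (hne : xs ≠ []) :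
    ((PySem.List.enumerate xs s).foldl
      (fun (st : List String × String) (p : Int × String) =>
        let st1 := if p.2 ≠ "" then (st.1, st.2 ++ p.2) else (st.1 ++ [st.2], "")
        if p.1 = n - 1 then (st1.1 ++ [st1.2], st1.2) else st1)
      (nu, tmp)).1
    = (xs.foldl pvStepA (nu, tmp)).1 ++ [(xs.foldl pvStepA (nu, tmp)).2] := by
  induction xs generalizing nu tmp s with
  | nil => exact absurd rfl hne
  | cons x t ih =>
    rw [PySem.List.enumerate_cons]
    cases t with
    | nil =>
      have hlast : s = n - 1 := by simp at hs; omega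
      by_cases hx : x = "" <;>
        simp [PySem.List.enumerate_nil, hlast, pvStepA, hx]
    | cons y r =>
      have hlt : ¬ (s = n - 1) := by simp at hs; omega
      have hs' : (s + 1) + ((y :: r).length : Int) = n := by simp at hs ⊢; omega
      simp only [List.foldl_cons]
      by_cases hx : x = ""
      · simp only [hx, ne_eq, not_true_eq_false, if_false, hlt, pvStepA]
        exact ih _ _ _ hs' (by simp)
      · simp only [ne_eq, hx, not_false_eq_true, if_true, hlt, if_false, pvStepA]
        exact ih _ _ _ hs' (by simp)

-- a fold of pvStepA over a delimiter-free block only grows the accumulator string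
lemma pv_fold_noblank (ys : List String) (nu : List String) (tmp : String)
    (hy : "" ∉ ys) :
    ys.foldl pvStepA (nu, tmp) = (nu, tmp ++ pvJn ys) := by
  induction ys generalizing tmp with
  | nil => simp [pvJn, PySem.Str.join]
  | cons y t ih =>
    have hyne : y ≠ "" := fun h => hy (by simp [h])
    rw [List.foldl_cons]
    show t.foldl pvStepA (pvStepA (nu, tmp) y) = _
    rw [pvStepA, if_pos hyne, ih (tmp ++ y) (fun h => hy (by simp [h])), pv_jn_cons]
    simp [String.append_assoc]

lemma pvGroupsB_ne_nil (xs : List String) : pvGroupsB xs ≠ [] := by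
  rw [pvGroupsB]
  split <;> simp

-- B's recursion computes exactly A's fold followed by the final flush, up to the pending prefix tmp
lemma pv_groupsB_fold (xs : List String) (nu : List String) (tmp : String) :
    (xs.foldl pvStepA (nu, tmp)).1 ++ [(xs.foldl pvStepA (nu, tmp)).2]
      = nu ++ ((tmp ++ (pvGroupsB xs).headD "") :: (pvGroupsB xs).tail) := by
  induction hL : xs.length using Nat.strong_induction_on generalizing xs nu tmp with
  | _ n ih =>
    subst hL
    rw [pvGroupsB]
    by_cases h : "" ∈ xs
    · rw [dif_pos h]
      set i := xs.idxOf "" with hi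
      have hlt : i < xs.length := List.idxOf_lt_length_of_mem h
      have hdecomp : xs.take i ++ "" :: xs.drop (i + 1) = xs := by
        have hget : xs[i] = "" := List.getElem_idxOf hlt
        rw [← hget, List.getElem_cons_drop, List.take_append_drop]
      have hnb : "" ∉ xs.take i := by
        intro hm
        have := (List.mem_take_iff_idxOf_lt h).mp hm
        omega
      have hlen : (xs.drop (i + 1)).length < xs.length := by
        simp only [List.length_drop]; omega
      obtain ⟨g, gs, hG⟩ := List.exists_cons_of_ne_nil (pvGroupsB_ne_nil (xs.drop (i + 1)))
      have hstep : pvStepA (nu, tmp ++ pvJn (xs.take i)) "" = (nu ++ [tmp ++ pvJn (xs.take i)], "") := by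
        simp [pvStepA]
      conv_lhs => rw [← hdecomp]
      rw [List.foldl_append, pv_fold_noblank _ _ _ hnb, List.foldl_cons, hstep,
        ih _ hlen _ _ _ rfl, hG]
      simp [pvJn]
    · rw [dif_neg h, pv_fold_noblank _ _ _ h]
      simp [pvJn]

-- ===== VERDICT =====
theorem process_list_data_spec : Claim_equal_process_list_data := by
  intro xs _
  unfold Spec_process_list_data process_list_data process_list_data_alt
  by_cases h : xs = []
  · subst h; rfl
  · rw [if_neg h, pv_enum_foldl xs [] "" 0 xs.length (by simp) h, pv_groupsB_fold]
    obtain ⟨g, gs, hG⟩ := List.exists_cons_of_ne_nil (pvGroupsB_ne_nil xs)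
    rw [hG]
    simp
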